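-- pv_equiv track=rewrite | github.com/yunjinli/VoMP | dataset_toolkits/material_objects/render_usd.py | _categorize_input
-- ===== SOURCE A (Python) =====
-- def _categorize_input(name: str) -> str:
--     name_lower = name.lower()
--
--     # Check for texture/color type based on common patterns
--     if any(
--         x in name_lower for x in ["diffuse", "albedo", "basecolor", "base_color"]
--     ):
--         return "diffuse"
--     elif any(x in name_lower for x in ["normal", "bump"]):
--         return "normal"
--     elif any(x in name_lower for x in ["rough"]):
--         return "roughness"
--     elif any(x in name_lower for x in ["metal"]):
--         return "metallic"
--     elif any(x in name_lower for x in ["orm", "occlusion"]):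
--         return "orm"
--     elif any(x in name_lower for x in ["opacity", "alpha"]):
--         return "opacity"
--     else:
--         return name  # Use original name if no match
-- ===== SOURCE B (Python) =====
-- # Single pass over string positions: at each position, find the highest-priority
-- # keyword starting there; the overall minimum priority decides the category.
-- _KEYWORDS = [
--     ("diffuse", "diffuse"), ("albedo", "diffuse"), ("basecolor", "diffuse"),
--     ("base_color", "diffuse"), ("normal", "normal"), ("bump", "normal"),
--     ("rough", "roughness"), ("metal", "metallic"), ("orm", "orm"),
--     ("occlusion", "orm"), ("opacity", "opacity"), ("alpha", "opacity"),
-- ]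
--
--
-- def _categorize_input(name: str) -> str:
--     low = name.lower()
--     best = len(_KEYWORDS)
--     for i in range(len(low)):
--         for pri in range(best):
--             if low.startswith(_KEYWORDS[pri][0], i):
--                 best = pri
--                 break
--     if best < len(_KEYWORDS):
--         return _KEYWORDS[best][1]
--     return name
-- ===== Notes on version B (the rewrite author's own statement) =====
-- stated objective: alternative
-- what changed: Instead of per-category whole-string substring tests (if/elif cascade of any(x in name_lower)), B lowercases once and makes a single left-to-right scan over string positions, at each position checking which flattened keyword starts there and keeping the minimum keyword priority seen; the category of the minimal priority (or the original name if none) is returned.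
import Mathlib
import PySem

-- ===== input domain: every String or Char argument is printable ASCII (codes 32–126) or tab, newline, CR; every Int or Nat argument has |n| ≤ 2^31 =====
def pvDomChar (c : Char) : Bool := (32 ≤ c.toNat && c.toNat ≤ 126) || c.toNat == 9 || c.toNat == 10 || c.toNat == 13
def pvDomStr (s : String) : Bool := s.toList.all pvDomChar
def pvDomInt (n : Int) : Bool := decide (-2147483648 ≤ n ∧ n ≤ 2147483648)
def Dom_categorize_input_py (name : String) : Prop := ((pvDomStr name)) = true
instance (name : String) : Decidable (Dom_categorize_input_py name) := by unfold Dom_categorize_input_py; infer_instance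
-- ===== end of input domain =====

-- B replaces A's per-category whole-string substring cascade with a single scan over
-- string positions keeping the minimum priority of a keyword starting there (alternative; same cost).

-- ===== PORT A =====
def categorize_input_py (name : String) : String :=
  let name_lower := PySem.Str.lower name
  if ["diffuse", "albedo", "basecolor", "base_color"].any (fun x => PySem.Str.isIn x name_lower) then
    "diffuse"
  else if ["normal", "bump"].any (fun x => PySem.Str.isIn x name_lower) then
    "normal"
  else if ["rough"].any (fun x => PySem.Str.isIn x name_lower) then
    "roughness"
  else if ["metal"].any (fun x => PySem.Str.isIn x name_lower) then
    "metallic"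
  else if ["orm", "occlusion"].any (fun x => PySem.Str.isIn x name_lower) then
    "orm"
  else if ["opacity", "alpha"].any (fun x => PySem.Str.isIn x name_lower) then
    "opacity"
  else
    name

-- ===== PORT B =====
-- the flattened (keyword, category) priority table of Source B
def pvKeywords : List (String × String) :=
  [("diffuse", "diffuse"), ("albedo", "diffuse"), ("basecolor", "diffuse"),
   ("base_color", "diffuse"), ("normal", "normal"), ("bump", "normal"),
   ("rough", "roughness"), ("metal", "metallic"), ("orm", "orm"),
   ("occlusion", "orm"), ("opacity", "opacity"), ("alpha", "opacity")]

-- low.startswith(_KEYWORDS[pri][0], i)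
def pvMatchAt (low : List Char) (i pri : Nat) : Bool :=
  PySem.Chars.startswith (List.drop i low) ((pvKeywords.getD pri ("", "")).1.toList)

-- the inner 'for pri in range(best): if …: best = pri; break' loop, scanning pri upward
def pvScan (low : List Char) (i pri b : Nat) : Nat :=
  if pri < b then
    if pvMatchAt low i pri then pri else pvScan low i (pri + 1) b
  else b
termination_by b - pri

def categorize_input_py_alt (name : String) : String :=
  let low := (PySem.Str.lower name).toList
  let best := (List.range low.length).foldl (fun b i => pvScan low i 0 b) pvKeywords.length
  match pvKeywords[best]? with
  | some kc => kc.2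
  | none => name

-- ===== PRECONDITION & SPEC =====
def Spec_categorize_input_py (name : String) (out : String) : Prop := out = categorize_input_py_alt name
instance (name : String) (out : String) : Decidable (Spec_categorize_input_py name out) := by unfold Spec_categorize_input_py; infer_instance

-- ===== CLAIM (what is proved, stated in full; the proofs are below) =====
def Claim_equal_categorize_input_py : Prop := ∀ (name : String), Dom_categorize_input_py name → Spec_categorize_input_py name (categorize_input_py name)

-- ===== LEMMAS AND PROOFS =====

-- keyword pri occurs somewhere in low
def pvG (low : List Char) (p : Nat) : Bool :=
  PySem.Chars.isIn ((pvKeywords.getD p ("", "")).1.toList) low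

theorem pvScan_spec (low : List Char) (i : Nat) : ∀ pri b, pri ≤ b →
    pvScan low i pri b ≤ b ∧
    (pvScan low i pri b < b → pvMatchAt low i (pvScan low i pri b) = true) ∧
    (∀ p, pri ≤ p → p < pvScan low i pri b → pvMatchAt low i p = false) := by
  intro pri b h
  unfold pvScan
  split
  · rename_i hlt
    split
    · rename_i hm
      exact ⟨Nat.le_of_lt hlt, fun _ => hm, fun p hp hps => absurd hps (by omega)⟩
    · rename_i hm
      have ih := pvScan_spec low i (pri + 1) b hlt
      refine ⟨ih.1, ih.2.1, fun p hp hps => ?_⟩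
      rcases Nat.eq_or_lt_of_le hp with heq | hlt'
      · simpa [← heq] using Bool.eq_false_iff.mpr (by simpa [heq] using hm)
      · exact ih.2.2 p hlt' hps
  · rename_i hge
    exact ⟨Nat.le_refl b, fun hc => absurd hc (Nat.lt_irrefl b), fun p hp hps => by omega⟩
termination_by pri b _ => b - pri

theorem pvFold_spec (low : List Char) : ∀ (l : List Nat) (b : Nat),
    l.foldl (fun b i => pvScan low i 0 b) b ≤ b ∧
    (l.foldl (fun b i => pvScan low i 0 b) b < b →
      ∃ i ∈ l, pvMatchAt low i (l.foldl (fun b i => pvScan low i 0 b) b) = true) ∧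
    (∀ p, p < l.foldl (fun b i => pvScan low i 0 b) b →
      ∀ i ∈ l, pvMatchAt low i p = false) := by
  intro l
  induction l with
  | nil => exact fun b => ⟨Nat.le_refl b, fun h => absurd h (Nat.lt_irrefl b), fun p hp i hi => absurd hi (List.not_mem_nil)⟩
  | cons i l ih =>
    intro b
    have hstep := pvScan_spec low i 0 b (Nat.zero_le b)
    have ihb := ih (pvScan low i 0 b)
    simp only [List.foldl_cons] at *
    refine ⟨Nat.le_trans ihb.1 hstep.1, ?_, ?_⟩
    · intro hlt
      rcases Nat.lt_or_ge (l.foldl (fun b i => pvScan low i 0 b) (pvScan low i 0 b)) (pvScan low i 0 b) with h1 | h1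
      · obtain ⟨j, hj, hm⟩ := ihb.2.1 h1
        exact ⟨j, List.mem_cons_of_mem _ hj, hm⟩
      · have heq : l.foldl (fun b i => pvScan low i 0 b) (pvScan low i 0 b) = pvScan low i 0 b :=
          Nat.le_antisymm ihb.1 h1
        refine ⟨i, List.mem_cons_self, ?_⟩
        rw [heq]
        exact hstep.2.1 (by omega)
    · intro p hp j hj
      rcases List.mem_cons.mp hj with rfl | hj'
      · exact hstep.2.2 p (Nat.zero_le p) (Nat.lt_of_lt_of_le hp ihb.1)
      · exact ihb.2.2 p hp j hj'

theorem pvKw_ne_nil : ∀ p, p < 12 → ((pvKeywords.getD p ("", "")).1.toList) ≠ [] := by decide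

theorem pvMatch_exists_iff (low : List Char) (p : Nat) (hp : p < 12) :
    (∃ i ∈ List.range low.length, pvMatchAt low i p = true) ↔ pvG low p = true := by
  constructor
  · rintro ⟨i, _, hm⟩
    rw [pvG, ← PySem.Chars.exists_prefix_drop_iff_isIn]
    exact ⟨i, (PySem.Chars.startswith_iff _ _).mp hm⟩
  · intro hg
    rw [pvG, ← PySem.Chars.exists_prefix_drop_iff_isIn] at hg
    obtain ⟨j, hj⟩ := hg
    refine ⟨j, List.mem_range.mpr ?_, (PySem.Chars.startswith_iff _ _).mpr hj⟩
    by_contra hge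
    have : List.drop j low = [] := List.drop_eq_nil_of_le (by omega)
    rw [this] at hj
    exact pvKw_ne_nil p hp (List.prefix_nil.mp hj)

set_option maxRecDepth 8000 in
theorem pv_main (name : String) : categorize_input_py name = categorize_input_py_alt name := by
  have hlen : pvKeywords.length = 12 := by decide
  set low := (PySem.Str.lower name).toList with hlow
  have hspec := pvFold_spec low (List.range low.length) pvKeywords.length
  rw [hlen] at hspec
  set r := (List.range low.length).foldl (fun b i => pvScan low i 0 b) 12 with hr
  have hle : r ≤ 12 := hspec.1
  have hmem : r < 12 → pvG low r = true := fun h =>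
    (pvMatch_exists_iff low r h).mp (hspec.2.1 h)
  have hlt : ∀ p, p < r → pvG low p = false := by
    intro p hp
    by_contra hc
    have hg : pvG low p = true := Bool.not_eq_false _ |>.mp hc
    obtain ⟨i, hi, hm⟩ := (pvMatch_exists_iff low p (by omega)).mpr hg
    exact absurd (hspec.2.2 p hp i hi) (by simp [hm])
  have hB : categorize_input_py_alt name =
      match pvKeywords[r]? with
      | some kc => kc.2
      | none => name := by
    rw [categorize_input_py_alt]
    rw [← hlow, hlen, ← hr]
  have hA : categorize_input_py name =
      if pvG low 0 || pvG low 1 || pvG low 2 || pvG low 3 then "diffuse"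
      else if pvG low 4 || pvG low 5 then "normal"
      else if pvG low 6 then "roughness"
      else if pvG low 7 then "metallic"
      else if pvG low 8 || pvG low 9 then "orm"
      else if pvG low 10 || pvG low 11 then "opacity"
      else name := by
    rw [categorize_input_py]
    simp only [List.any_cons, List.any_nil, Bool.or_false, pvG, pvKeywords, List.getD,
      PySem.Str.isIn_eq, ← hlow, List.getElem?_cons_zero,
      List.getElem?_cons_succ, Option.getD_some]
    simp [Bool.or_assoc]
  rw [hA, hB]
  interval_cases r <;>
  all_goals
    ((try simp only [hmem (by omega)]);
     (try simp only [hlt 0 (by omega)]); (try simp only [hlt 1 (by omega)]);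
     (try simp only [hlt 2 (by omega)]); (try simp only [hlt 3 (by omega)]);
     (try simp only [hlt 4 (by omega)]); (try simp only [hlt 5 (by omega)]);
     (try simp only [hlt 6 (by omega)]); (try simp only [hlt 7 (by omega)]);
     (try simp only [hlt 8 (by omega)]); (try simp only [hlt 9 (by omega)]);
     (try simp only [hlt 10 (by omega)]); (try simp only [hlt 11 (by omega)]);
     simp [pvKeywords])

-- ===== VERDICT (by name: the statement is the Claim_ definition above) =====
theorem categorize_input_py_spec : Claim_equal_categorize_input_py := by
  intro name _
  exact pv_main name
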